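-- pv_equiv track=rewrite | github.com/ProgKap/analisis | main.py | solve_with_array
-- ===== SOURCE A (Python) =====
-- from dataclasses import dataclass
-- from typing import Dict, List, Tuple
--
-- @dataclass
-- class PrefixRange:
--     base: List[int]
--     ext: List[int]
--     pref: List[int]
--     m: int
--     ext_m: int
--
--     @staticmethod
--     def build(st: List[int]) -> "PrefixRange":
--         m = len(st)
--         ext = st + st
--         pref = [0] * (len(ext) + 1)
--         for i, v in enumerate(ext):
--             pref[i + 1] = pref[i] + v
--         return PrefixRange(base=st, ext=ext, pref=pref, m=m, ext_m=len(ext))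
--
--     def range_sum(self, i: int, k: int) -> int:
--         if k <= 0:
--             return 0
--         end = i + k
--         return self.pref[end] - self.pref[i]
--
-- def _solve_rec_array(i: int, k: int, n: int, pr: PrefixRange, memo: List[List[int]]) -> int:
--     if k <= 0:
--         return 0
--     if memo[i][k] != -1:
--         return memo[i][k]
--     if k <= n:
--         res = pr.range_sum(i, k)
--         memo[i][k] = res
--         return res
--     gain_left = pr.range_sum(i, n)
--     rem_left = pr.range_sum(i + n, k - n)
--     opp_left = _solve_rec_array(i + n, k - n, n, pr, memo)
--     val_left = gain_left + rem_left - opp_left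
--     gain_right = pr.range_sum(i + k - n, n)
--     rem_right = pr.range_sum(i, k - n)
--     opp_right = _solve_rec_array(i, k - n, n, pr, memo)
--     val_right = gain_right + rem_right - opp_right
--     res = max(val_left, val_right)
--     memo[i][k] = res
--     return res
--
-- def solve_with_array(st: List[int]) -> int:
--     m = len(st)
--     n = m // 2
--     if n == 0:
--         return 0
--     pr = PrefixRange.build(st)
--     memo = [[-1 for _ in range(2 * n + 1)] for _ in range(4 * n)]
--     best = -10**18
--     for i in range(2 * n):
--         gain_first = pr.range_sum(i, n)
--         rem = pr.range_sum(i + n, n)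
--         opp = _solve_rec_array(i + n, n, n, pr, memo)
--         prof = gain_first + (rem - opp)
--         best = max(best, prof)
--     return best
-- ===== SOURCE B (Python) =====
-- def solve_with_array(st):
--     # Sliding-window maximum over the doubled array: one running window sum,
--     # no prefix array, no memo table, no recursion.
--     n = len(st) // 2
--     if n == 0:
--         return 0
--     ext = st + st
--     best = -10**18
--     cur = 0
--     for i in range(2 * n):
--         if i == 0:
--             cur = sum(ext[:n])
--         else:
--             cur += ext[i + n - 1] - ext[i - 1]
--         best = max(best, cur)
--     return best
-- ===== Notes on version B (the rewrite author's own statement) =====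
-- stated objective: faster
-- what changed: Replaced the prefix-sum array plus O(n^2) memo table and (dead) memoized recursion with a single O(n) sliding-window pass over the doubled array maintaining one running window sum.
import Mathlib
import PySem

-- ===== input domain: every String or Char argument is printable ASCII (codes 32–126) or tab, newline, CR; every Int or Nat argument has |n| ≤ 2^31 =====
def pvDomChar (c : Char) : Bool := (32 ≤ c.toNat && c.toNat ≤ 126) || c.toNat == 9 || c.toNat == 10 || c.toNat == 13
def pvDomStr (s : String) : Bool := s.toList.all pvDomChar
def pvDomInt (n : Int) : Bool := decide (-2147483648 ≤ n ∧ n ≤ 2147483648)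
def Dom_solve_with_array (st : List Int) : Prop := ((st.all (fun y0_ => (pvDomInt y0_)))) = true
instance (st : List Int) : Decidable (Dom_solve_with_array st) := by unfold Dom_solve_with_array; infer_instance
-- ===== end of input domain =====

-- B replaces A's prefix-sum array + O(n^2) memo table + (never-recursing) memoized
-- recursion by a single sliding-window pass maintaining one running window sum.

-- ===== PORT A =====
-- PrefixRange.range_sum; indices are in range at every call A makes, the default 0 is a totality guard
def pvRangeSum (pref : List Int) (i k : Int) : Int :=
  if k ≤ 0 then 0
  else PySem.List.pyGetD pref (i + k) 0 - PySem.List.pyGetD pref i 0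

-- the 'for i, v in enumerate(ext): pref[i+1] = pref[i] + v' loop of PrefixRange.build
def pvPrefLoop : List Int → Nat → List Int → List Int
  | [], _, pref => pref
  | v :: rest, i, pref => pvPrefLoop rest (i + 1) (pref.set (i + 1) (pref.getD i 0 + v))

def pvBuildPref (ext : List Int) : List Int :=
  pvPrefLoop ext 0 (List.replicate (ext.length + 1) 0)

-- memo[i][k] read / write; indices are nonneg and in range at every call A makes
def pvMemoGet (memo : List (List Int)) (i k : Int) : Int :=
  PySem.List.pyGetD (PySem.List.pyGetD memo i []) k (-1)

def pvMemoSet (memo : List (List Int)) (i k v : Int) : List (List Int) :=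
  memo.set i.toNat ((PySem.List.pyGetD memo i []).set k.toNat v)

-- _solve_rec_array; fuel is a totality guard only (Python's recursion terminates at every call A makes)
def pvSolveRec (fuel : Nat) (i k n : Int) (pref : List Int) (memo : List (List Int)) :
    Int × List (List Int) :=
  match fuel with
  | 0 => (0, memo)
  | fuel + 1 =>
    if k ≤ 0 then (0, memo)
    else if pvMemoGet memo i k ≠ -1 then (pvMemoGet memo i k, memo)
    else if k ≤ n then
      let res := pvRangeSum pref i k
      (res, pvMemoSet memo i k res)
    else
      let gain_left := pvRangeSum pref i n
      let rem_left := pvRangeSum pref (i + n) (k - n)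
      let pl := pvSolveRec fuel (i + n) (k - n) n pref memo
      let val_left := gain_left + rem_left - pl.1
      let gain_right := pvRangeSum pref (i + k - n) n
      let rem_right := pvRangeSum pref i (k - n)
      let pr := pvSolveRec fuel i (k - n) n pref pl.2
      let val_right := gain_right + rem_right - pr.1
      let res := max val_left val_right
      (res, pvMemoSet pr.2 i k res)

def solve_with_array (st : List Int) : Int :=
  let m : Int := st.length
  let n : Int := PySem.Int.floordiv m 2
  if n = 0 then 0
  else
    let ext := st ++ st
    let pref := pvBuildPref ext
    let memo : List (List Int) := List.replicate (4 * n).toNat (List.replicate (2 * n + 1).toNat (-1))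
    ((PySem.List.pyRange 0 (2 * n) 1).foldl
      (fun (s : Int × List (List Int)) (i : Int) =>
        let gain_first := pvRangeSum pref i n
        let rem := pvRangeSum pref (i + n) n
        let p := pvSolveRec (n.toNat + 1) (i + n) n n pref s.2
        let prof := gain_first + (rem - p.1)
        (max s.1 prof, p.2))
      (-(10 : Int) ^ 18, memo)).1

-- ===== PORT B =====
def solve_with_array_alt (st : List Int) : Int :=
  let n : Int := PySem.Int.floordiv (st.length : Int) 2
  if n = 0 then 0
  else
    let ext := st ++ st
    ((PySem.List.pyRange 0 (2 * n) 1).foldl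
      (fun (s : Int × Int) (i : Int) =>
        let cur := if i = 0 then (PySem.List.slice ext none (some n)).sum
                   else s.2 + PySem.List.pyGetD ext (i + n - 1) 0 - PySem.List.pyGetD ext (i - 1) 0
        (max s.1 cur, cur))
      (-(10 : Int) ^ 18, 0)).1

-- ===== PRECONDITION & SPEC =====
def Spec_solve_with_array (st : List Int) (out : Int) : Prop := out = solve_with_array_alt st
instance (st : List Int) (out : Int) : Decidable (Spec_solve_with_array st out) := by unfold Spec_solve_with_array; infer_instance

-- ===== CLAIM (what is proved, stated in full; the proofs are below) =====
def Claim_equal_solve_with_array : Prop := ∀ (st : List Int), Dom_solve_with_array st → Spec_solve_with_array st (solve_with_array st)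

-- ===== LEMMAS AND PROOFS =====

theorem getD_set_int {α : Type} (l : List α) (i j : Nat) (a d : α) :
    (l.set i a).getD j d = if i = j ∧ i < l.length then a else l.getD j d := by
  simp only [List.getD_eq_getElem?_getD, List.getElem?_set]
  by_cases h1 : i = j
  · subst h1
    by_cases h2 : i < l.length
    · simp [h2]
    · simp [h2]
  · simp [h1]

theorem pvPrefLoop_getD (ys : List Int) : ∀ (i : Nat) (pref : List Int),
    pref.length = i + ys.length + 1 →
    ∀ j : Nat, j ≤ i + ys.length →
    (pvPrefLoop ys i pref).getD j 0 =
      if j ≤ i then pref.getD j 0 else pref.getD i 0 + ((ys.take (j - i)).sum) := by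
  induction ys with
  | nil =>
    intro i pref hlen j hj
    simp only [List.length_nil, Nat.add_zero] at hj
    simp [pvPrefLoop, hj]
  | cons v rest ih =>
    intro i pref hlen j hj
    simp only [List.length_cons] at hlen hj
    rw [pvPrefLoop]
    have hlen' : (pref.set (i + 1) (pref.getD i 0 + v)).length = (i + 1) + rest.length + 1 := by
      rw [List.length_set]; omega
    rw [ih (i + 1) _ hlen' j (by omega)]
    by_cases hji : j ≤ i
    · rw [if_pos (by omega : j ≤ i + 1), getD_set_int,
        if_neg (by omega : ¬(i + 1 = j ∧ i + 1 < pref.length)), if_pos hji]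
    · by_cases hji1 : j ≤ i + 1
      · have hj1 : i + 1 = j := by omega
        rw [if_pos hji1, getD_set_int, if_pos ⟨hj1, by omega⟩, if_neg hji]
        have h1 : j - i = 1 := by omega
        rw [h1]; simp
      · rw [if_neg hji1, if_neg hji]
        rw [getD_set_int, if_pos ⟨rfl, by omega⟩]
        have htake : (v :: rest).take (j - i) = v :: rest.take (j - (i + 1)) := by
          have h2 : j - i = (j - (i + 1)) + 1 := by omega
          rw [h2, List.take_succ_cons]
        rw [htake]; simp; ring

theorem pvBuildPref_getD (ext : List Int) (j : Nat) (hj : j ≤ ext.length) :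
    (pvBuildPref ext).getD j 0 = (ext.take j).sum := by
  rw [pvBuildPref, pvPrefLoop_getD ext 0 _ (by simp) j (by omega)]
  by_cases h0 : j = 0
  · simp [h0]
  · rw [if_neg (by omega)]
    simp

-- window sum
def pvW (ext : List Int) (N : Nat) (i : Nat) : Int := ((ext.drop i).take N).sum

theorem pvW_eq_takes (ext : List Int) (N i : Nat) :
    pvW ext N i = (ext.take (i + N)).sum - (ext.take i).sum := by
  rw [pvW, List.take_add]; simp

theorem pvRangeSum_eq (ext : List Int) (i k : Nat) (hk : 0 < k) (hik : i + k ≤ ext.length) :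
    pvRangeSum (pvBuildPref ext) (i : Int) (k : Int) = pvW ext k i := by
  rw [pvRangeSum, if_neg (by omega)]
  have h1 : (i : Int) + (k : Int) = ((i + k : Nat) : Int) := by push_cast; ring
  rw [h1, PySem.List.pyGetD_natCast, PySem.List.pyGetD_natCast,
    pvBuildPref_getD ext _ hik, pvBuildPref_getD ext i (by omega), pvW_eq_takes]

theorem take_sum_succ (ext : List Int) (s : Nat) (hs : s < ext.length) :
    (ext.take (s + 1)).sum = (ext.take s).sum + ext.getD s 0 := by
  have h : ext[s]? = some ext[s] := List.getElem?_eq_getElem hs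
  rw [List.getD_eq_getElem?_getD, h, List.sum_take_succ _ _ hs]
  simp

theorem pvW_slide (ext : List Int) (N j : Nat) (hj : j + N < ext.length) :
    pvW ext N (j + 1) = pvW ext N j + ext.getD (j + N) 0 - ext.getD j 0 := by
  rw [pvW_eq_takes, pvW_eq_takes]
  have h1 : j + 1 + N = (j + N) + 1 := by omega
  rw [h1, take_sum_succ ext (j + N) hj, take_sum_succ ext j (by omega)]
  ring

-- memo invariant: every non-(-1) entry holds the range sum for its position
def pvInv (pref : List Int) (memo : List (List Int)) : Prop :=
  ∀ j k : Nat, (memo.getD j []).getD k (-1) ≠ -1 →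
    (memo.getD j []).getD k (-1) = pvRangeSum pref (j : Int) (k : Int)

theorem getD_replicate' {α : Type} (nn : Nat) (c d : α) (j : Nat) :
    (List.replicate nn c).getD j d = if j < nn then c else d := by
  simp only [List.getD_eq_getElem?_getD, List.getElem?_replicate]
  split_ifs <;> simp

theorem pvInv_init (pref : List Int) (a c : Nat) :
    pvInv pref (List.replicate a (List.replicate c (-1))) := by
  intro j k h
  exfalso; apply h
  rw [getD_replicate']
  split_ifs with h1
  · rw [getD_replicate']; split_ifs <;> rfl
  · rfl

theorem pvMemoGet_natCast (memo : List (List Int)) (j k : Nat) :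
    pvMemoGet memo (j : Int) (k : Int) = (memo.getD j []).getD k (-1) := by
  rw [pvMemoGet, PySem.List.pyGetD_natCast, PySem.List.pyGetD_natCast]

theorem pvMemoSet_inv (pref : List Int) (memo : List (List Int)) (a b : Nat)
    (hInv : pvInv pref memo) (v : Int) (hv : v = pvRangeSum pref (a : Int) (b : Int)) :
    pvInv pref (pvMemoSet memo (a : Int) (b : Int) v) := by
  intro j k h
  rw [pvMemoSet, PySem.List.pyGetD_natCast, Int.toNat_natCast, Int.toNat_natCast] at h ⊢
  rw [getD_set_int] at h ⊢
  split_ifs at h ⊢ with h1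
  · obtain ⟨rfl, _⟩ := h1
    rw [getD_set_int] at h ⊢
    split_ifs at h ⊢ with h2
    · obtain ⟨rfl, _⟩ := h2; exact hv
    · exact hInv _ _ h
  · exact hInv _ _ h

theorem pvSolveRec_spec (pref : List Int) (memo : List (List Int)) (i n : Int) (fuel : Nat)
    (hn : 0 < n) (hi : 0 ≤ i) (hInv : pvInv pref memo) :
    (pvSolveRec (fuel + 1) i n n pref memo).1 = pvRangeSum pref i n ∧
    pvInv pref (pvSolveRec (fuel + 1) i n n pref memo).2 := by
  have hi' : ((i.toNat : Nat) : Int) = i := Int.toNat_of_nonneg hi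
  have hn' : ((n.toNat : Nat) : Int) = n := Int.toNat_of_nonneg (by omega)
  rw [pvSolveRec]
  rw [if_neg (by omega : ¬ n ≤ 0)]
  by_cases hmem : pvMemoGet memo i n ≠ -1
  · rw [if_pos hmem]
    have h2 : pvMemoGet memo i n = pvMemoGet memo ((i.toNat : Nat) : Int) ((n.toNat : Nat) : Int) := by
      rw [hi', hn']
    rw [pvMemoGet_natCast] at h2
    refine ⟨?_, hInv⟩
    rw [h2] at hmem ⊢
    rw [hInv i.toNat n.toNat hmem, hi', hn']
  · rw [if_neg hmem, if_pos (le_refl n)]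
    refine ⟨rfl, ?_⟩
    have := pvMemoSet_inv pref memo i.toNat n.toNat hInv (pvRangeSum pref i n) (by rw [hi', hn'])
    rw [hi', hn'] at this
    exact this

theorem pvLoop (ext : List Int) (N mN : Nat) (hN : 0 < N)
    (hm : ext.length = 2 * mN) (h2N : 2 * N ≤ mN) :
    ∀ (cnt : Nat) (i b cur : Int) (memo : List (List Int)),
      pvInv (pvBuildPref ext) memo → 0 ≤ i → i + cnt = 2 * (N : Int) →
      (i = 0 ∨ cur = pvW ext N (i.toNat - 1)) →
      ((PySem.List.pyRange i (2 * (N : Int)) 1).foldl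
        (fun (s : Int × List (List Int)) (i : Int) =>
          let gain_first := pvRangeSum (pvBuildPref ext) i (N : Int)
          let rem := pvRangeSum (pvBuildPref ext) (i + (N : Int)) (N : Int)
          let p := pvSolveRec (((N : Int)).toNat + 1) (i + (N : Int)) (N : Int) (N : Int) (pvBuildPref ext) s.2
          let prof := gain_first + (rem - p.1)
          (max s.1 prof, p.2)) (b, memo)).1 =
      ((PySem.List.pyRange i (2 * (N : Int)) 1).foldl
        (fun (s : Int × Int) (i : Int) =>
          let cur := if i = 0 then (PySem.List.slice ext none (some (N : Int))).sum
                     else s.2 + PySem.List.pyGetD ext (i + (N : Int) - 1) 0 - PySem.List.pyGetD ext (i - 1) 0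
          (max s.1 cur, cur)) (b, cur)).1 := by
  intro cnt
  induction cnt with
  | zero =>
    intro i b cur memo hInv hi hcnt hcur
    rw [PySem.List.pyRange_one_eq_nil (by omega)]
    rfl
  | succ cnt ih =>
    intro i b cur memo hInv hi hcnt hcur
    have hilt : i < 2 * (N : Int) := by omega
    have hiN : ((i.toNat : Nat) : Int) = i := Int.toNat_of_nonneg hi
    have hitlt : i.toNat < 2 * N := by omega
    rw [PySem.List.pyRange_one_cons hilt]
    simp only [List.foldl_cons]
    -- A's step value
    obtain ⟨hp1, hp2⟩ := pvSolveRec_spec (pvBuildPref ext) memo (i + (N : Int)) (N : Int)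
      ((N : Int)).toNat (by exact_mod_cast hN) (by omega) hInv
    have hgain : pvRangeSum (pvBuildPref ext) i (N : Int) = pvW ext N i.toNat := by
      rw [← hiN, pvRangeSum_eq ext i.toNat N hN (by omega), Int.toNat_natCast]
    -- B's step value
    have hcur' : (if i = 0 then (PySem.List.slice ext none (some (N : Int))).sum
        else cur + PySem.List.pyGetD ext (i + (N : Int) - 1) 0 - PySem.List.pyGetD ext (i - 1) 0)
        = pvW ext N i.toNat := by
      by_cases hi0 : i = 0
      · subst hi0
        rw [if_pos rfl, PySem.List.slice_to _ (by positivity), Int.toNat_natCast, pvW]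
        simp
      · rw [if_neg hi0]
        have hj : cur = pvW ext N (i.toNat - 1) := hcur.resolve_left hi0
        have h1 : i + (N : Int) - 1 = (((i.toNat - 1 + N : Nat)) : Int) := by push_cast; omega
        have h2 : i - 1 = (((i.toNat - 1 : Nat)) : Int) := by omega
        rw [hj, h1, h2, PySem.List.pyGetD_natCast, PySem.List.pyGetD_natCast]
        have h3 : i.toNat = (i.toNat - 1) + 1 := by omega
        rw [h3, pvW_slide ext N (i.toNat - 1) (by omega)]
        simp [List.getD_eq_getElem?_getD]
    rw [hcur']
    have hA : (max b (pvRangeSum (pvBuildPref ext) i (N : Int) +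
        (pvRangeSum (pvBuildPref ext) (i + (N : Int)) (N : Int) -
          (pvSolveRec (((N : Int)).toNat + 1) (i + (N : Int)) (N : Int) (N : Int) (pvBuildPref ext) memo).1)))
        = max b (pvW ext N i.toNat) := by
      rw [hp1, hgain]; ring_nf
    rw [hA]
    have := ih (i + 1) (max b (pvW ext N i.toNat)) (pvW ext N i.toNat)
      (pvSolveRec (((N : Int)).toNat + 1) (i + (N : Int)) (N : Int) (N : Int) (pvBuildPref ext) memo).2
      hp2 (by omega) (by omega) (Or.inr (by rw [show (i+1).toNat - 1 = i.toNat by omega]))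
    exact this

theorem solve_with_array_eq (st : List Int) : solve_with_array st = solve_with_array_alt st := by
  have hn : PySem.Int.floordiv (st.length : Int) 2 = ((st.length / 2 : Nat) : Int) := by
    exact_mod_cast PySem.Int.floordiv_natCast st.length 2
  rw [solve_with_array, solve_with_array_alt]
  simp only [hn]
  by_cases h0 : st.length / 2 = 0
  · simp [h0]
  · rw [if_neg (by exact_mod_cast h0), if_neg (by exact_mod_cast h0)]
    have := pvLoop (st ++ st) (st.length / 2) st.length (by omega)
      (by simp [List.length_append]; ring) (by omega)
      (2 * (st.length / 2)) 0 (-(10 : Int) ^ 18) 0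
      (List.replicate (4 * ((st.length / 2 : Nat) : Int)).toNat
        (List.replicate (2 * ((st.length / 2 : Nat) : Int) + 1).toNat (-1)))
      (pvInv_init _ _ _) (by omega) (by push_cast; omega) (Or.inl rfl)
    exact this

-- ===== VERDICT (by name: the statement is the Claim_ definition above) =====
theorem solve_with_array_spec : Claim_equal_solve_with_array := by
  intro st _
  exact solve_with_array_eq st
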